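-- pv_equiv track=rewrite | github.com/abkamand/CI-Testing-practice | tests.py | parse_hex_little_endian_negative
-- ===== SOURCE A (Python) =====
-- def parse_hex_little_endian_negative(hex_string):
--     """Parses a hex string of a negative number into a string in
--         little-endian byte order"""
--     hex_string = hex_string[3:len(hex_string) + 1]
--     clean_string = ""
--     while len(hex_string) > 0:
--
--         if len(hex_string) > 1:
--             cur_nybble = hex_string[
--                          len(hex_string) - 2:len(hex_string) + 1]
--             hex_string = hex_string[0:len(hex_string) - 2]
--             upper_first = cur_nybble[0].upper()
--             upper_second = cur_nybble[1].upper()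
--         else:
--             upper_first = "0"
--             upper_second = hex_string[0].upper()
--             hex_string = ""
--
--         clean_string = upper_first + upper_second + clean_string
--
--         if len(hex_string) > 0:
--             clean_string = " " + clean_string
--
--     # Just need to prepend the negative sign now
--     clean_string = "-" + clean_string
--     return clean_string
-- ===== SOURCE B (Python) =====
-- def parse_hex_little_endian_negative(hex_string):
--     """Parses a hex string of a negative number into a string in
--         little-endian byte order"""
--     clean = hex_string[3:]
--     if len(clean) % 2 == 1:
--         clean = "0" + clean
--     pairs = [clean[i:i + 2].upper() for i in range(0, len(clean), 2)]
--     return "-" + " ".join(pairs)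
-- ===== Notes on version B (the rewrite author's own statement) =====
-- stated objective: simpler
-- what changed: Replaces A's backward while-loop that peels two characters off the end via repeated re-slicing and string prepending (with an odd-length special case inside the loop) by a normalize-then-chunk forward pass: pad once to even length, chunk forward with a comprehension over range(0,len,2), and join with spaces.
import Mathlib
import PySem

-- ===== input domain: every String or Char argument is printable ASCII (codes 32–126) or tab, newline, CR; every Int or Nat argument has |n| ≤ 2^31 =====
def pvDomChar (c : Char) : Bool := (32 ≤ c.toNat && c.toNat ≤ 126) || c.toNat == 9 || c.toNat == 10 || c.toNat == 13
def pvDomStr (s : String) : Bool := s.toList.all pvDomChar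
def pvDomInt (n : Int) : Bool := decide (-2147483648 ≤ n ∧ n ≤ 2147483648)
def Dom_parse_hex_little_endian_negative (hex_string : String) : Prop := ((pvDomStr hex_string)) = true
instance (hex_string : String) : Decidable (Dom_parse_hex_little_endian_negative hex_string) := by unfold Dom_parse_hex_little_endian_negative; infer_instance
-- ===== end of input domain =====

-- B replaces A's backward peel-and-prepend while loop by a pad-then-chunk-forward pass (simpler decomposition; return value only).

-- ===== PORT A =====
-- the while loop: state (hex_string, clean_string)
def pvALoop (hex clean : List Char) : List Char :=
  if _h : hex.length > 0 then
    let t : Char × Char × List Char :=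
      if hex.length > 1 then
        let cur := PySem.List.slice hex (some ((hex.length : Int) - 2)) (some ((hex.length : Int) + 1))
        (PySem.Chars.upperChar ((PySem.List.pyGet? cur 0).getD ' '),
         PySem.Chars.upperChar ((PySem.List.pyGet? cur 1).getD ' '),
         PySem.List.slice hex (some 0) (some ((hex.length : Int) - 2)))
      else
        ('0', PySem.Chars.upperChar ((PySem.List.pyGet? hex 0).getD ' '), [])
    let clean' := t.1 :: t.2.1 :: clean
    let clean'' := if t.2.2.length > 0 then ' ' :: clean' else clean'
    pvALoop t.2.2 clean''
  else clean
termination_by hex.length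
decreasing_by
  · split
    · simp only [PySem.List.slice_zero_start]
      rw [PySem.List.slice_to _ (by omega : (0:Int) ≤ (hex.length : Int) - 2)]
      simp only [List.length_take]
      omega
    · simpa using _h

def parse_hex_little_endian_negative (hex_string : String) : String :=
  let hex := PySem.List.slice hex_string.toList (some 3) (some ((hex_string.toList.length : Int) + 1))
  String.ofList ('-' :: pvALoop hex [])

-- ===== PORT B =====
def parse_hex_little_endian_negative_alt (hex_string : String) : String :=
  let clean0 := PySem.List.slice hex_string.toList (some 3) none
  let clean := if clean0.length % 2 = 1 then '0' :: clean0 else clean0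
  let pairs := (PySem.List.pyRange 0 (clean.length : Int) 2).map
      (fun i => PySem.Chars.upper (PySem.List.slice clean (some i) (some (i + 2))))
  String.ofList ('-' :: PySem.Chars.join [' '] pairs)

-- ===== PRECONDITION & SPEC =====
def Spec_parse_hex_little_endian_negative (hex_string : String) (out : String) : Prop := out = parse_hex_little_endian_negative_alt hex_string
instance (hex_string : String) (out : String) : Decidable (Spec_parse_hex_little_endian_negative hex_string out) := by unfold Spec_parse_hex_little_endian_negative; infer_instance

-- ===== CLAIM (what is proved, stated in full; the proofs are below) =====
def Claim_equal_parse_hex_little_endian_negative : Prop := ∀ (hex_string : String), Dom_parse_hex_little_endian_negative hex_string → Spec_parse_hex_little_endian_negative hex_string (parse_hex_little_endian_negative hex_string)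

-- ===== LEMMAS AND PROOFS =====

-- reference form: uppercased byte pairs joined by single spaces (input assumed even length)
def pvChunks : List Char → List Char
  | a :: b :: rest =>
      PySem.Chars.upperChar a :: PySem.Chars.upperChar b ::
        (if rest.isEmpty then [] else ' ' :: pvChunks rest)
  | _ => []

def pvPad (cs : List Char) : List Char := if cs.length % 2 = 1 then '0' :: cs else cs

lemma pvPad_even (cs : List Char) : (pvPad cs).length % 2 = 0 := by
  unfold pvPad; split; · simp only [List.length_cons]; omega
  · omega

lemma pvPad_snoc2 (xs : List Char) (a b : Char) :
    pvPad (xs ++ [a, b]) = pvPad xs ++ [a, b] := by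
  unfold pvPad
  simp only [List.length_append, List.length_cons, List.length_nil]
  split_ifs with h1 h2 h2
  · simp
  · exfalso; omega
  · exfalso; omega
  · rfl

lemma pvPad_eq_nil_iff (xs : List Char) : pvPad xs = [] ↔ xs = [] := by
  unfold pvPad
  split_ifs with h
  · constructor
    · intro hc; simp at hc
    · rintro rfl; simp at h
  · exact Iff.rfl

lemma pvChunks_snoc : ∀ (ys : List Char) (a b : Char), ys.length % 2 = 0 →
    pvChunks (ys ++ [a, b]) =
      pvChunks ys ++ (if ys.isEmpty then [PySem.Chars.upperChar a, PySem.Chars.upperChar b]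
                      else ' ' :: PySem.Chars.upperChar a :: PySem.Chars.upperChar b :: [])
  | [], a, b, _ => by simp [pvChunks]
  | [x], _, _, h => by simp at h
  | x :: y :: rest, a, b, h => by
      have ih := pvChunks_snoc rest a b (by simp only [List.length_cons] at h; omega)
      by_cases hr : rest = []
      · subst hr; simp [pvChunks]
      · have hne : ¬ (rest ++ [a, b]).isEmpty := by simp
        simp only [List.cons_append, pvChunks, hne, ih, List.isEmpty_iff, hr]
        simp

lemma pvUpper_zero : PySem.Chars.upperChar '0' = '0' := by decide

lemma pvALoop_eq (hex clean : List Char) :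
    pvALoop hex clean = pvChunks (pvPad hex) ++ clean := by
  induction hn : hex.length using Nat.strong_induction_on generalizing hex clean with
  | _ n ih =>
  rw [pvALoop]
  by_cases h0 : hex.length > 0
  · rw [dif_pos h0]
    by_cases h1 : hex.length > 1
    · -- at least two characters: peel the last two
      obtain ⟨a, b, hd⟩ := List.length_eq_two.mp
        (show (hex.drop (hex.length - 2)).length = 2 by simp; omega)
      have hcur : PySem.List.slice hex (some ((hex.length : Int) - 2)) (some ((hex.length : Int) + 1))
          = [a, b] := by
        rw [PySem.List.slice_toNat _ (by omega) (by omega)]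
        have h2 : ((hex.length : Int) - 2).toNat = hex.length - 2 := by omega
        have h3 : ((hex.length : Int) + 1).toNat = hex.length + 1 := by omega
        rw [h2, h3, hd]
        have : hex.length + 1 - (hex.length - 2) = 3 := by omega
        rw [this]
        rfl
      have hhex' : PySem.List.slice hex (some 0) (some ((hex.length : Int) - 2))
          = hex.take (hex.length - 2) := by
        simp only [PySem.List.slice_zero_start]
        rw [PySem.List.slice_to _ (by omega : (0:Int) ≤ (hex.length : Int) - 2)]
        congr 1; omega
      simp only [if_pos h1, hcur, hhex']
      have hxlen : (hex.take (hex.length - 2)).length = hex.length - 2 := by simp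
      rw [ih (hex.length - 2) (by omega) _ _ hxlen]
      have hsplit : hex = hex.take (hex.length - 2) ++ [a, b] := by
        conv_lhs => rw [← List.take_append_drop (hex.length - 2) hex]
        rw [hd]
      conv_rhs => rw [hsplit]
      rw [pvPad_snoc2, pvChunks_snoc _ a b (pvPad_even _)]
      by_cases hxs : hex.take (hex.length - 2) = []
      · have : hex.length - 2 = 0 := by rw [← hxlen, hxs]; rfl
        simp [this, PySem.List.pyGet?, PySem.List.pyIdx?, pvPad_eq_nil_iff]
      · have hlen2 : hex.length - 2 > 0 := by
          rcases Nat.eq_zero_or_pos (hex.length - 2) with h | h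
          · exact absurd (List.take_eq_nil_iff.mpr (by omega)) hxs
          · exact h
        have hpe : ¬ (pvPad (hex.take (hex.length - 2))).isEmpty := by
          simp [List.isEmpty_iff, pvPad_eq_nil_iff, hxs]
        simp only [hxlen, List.isEmpty_iff, pvPad_eq_nil_iff, if_pos hlen2,
          if_neg hxs, PySem.List.pyGet?, PySem.List.pyIdx?]
        simp
    · -- exactly one character
      have hone : hex.length = 1 := by omega
      obtain ⟨c, hc⟩ := List.length_eq_one_iff.mp hone
      subst hc
      rw [if_neg h1, pvALoop]
      simp [pvPad, pvChunks, PySem.List.pyGet?, PySem.List.pyIdx?, pvUpper_zero]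
  · have : hex = [] := by cases hex <;> simp_all
    subst this
    simp [pvPad, pvChunks]

def pvIdxs (m : Nat) : List Int := (List.range ((m + 1) / 2)).map (fun k : Nat => 2 * (k : Int))

lemma pvRange2 (m : Nat) : PySem.List.pyRange 0 (m : Int) 2 = pvIdxs m := by
  rw [PySem.List.pyRange_of_pos _ _ (by norm_num)]
  have hc : (if (0 : Int) < (m : Int) then (((m : Int) - 0 + 2 - 1) / 2).toNat else 0) = (m + 1) / 2 := by
    split_ifs with h <;> omega
  rw [hc]
  unfold pvIdxs
  simp only [zero_add]

lemma pvIdxs_cons (m : Nat) : pvIdxs (m + 2) = (0 : Int) :: (pvIdxs m).map (· + 2) := by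
  unfold pvIdxs
  rw [show (m + 2 + 1) / 2 = (m + 1) / 2 + 1 from by omega, List.range_succ_eq_map]
  simp only [List.map_cons, Nat.cast_zero, mul_zero, List.map_map]
  refine congrArg₂ List.cons rfl ?_
  apply List.map_congr_left
  intro k _
  simp only [Function.comp]
  push_cast
  ring

lemma pvPairsB_cons (a b : Char) (rest : List Char) :
    ((PySem.List.pyRange 0 (((a :: b :: rest).length : Nat) : Int) 2).map
      (fun i => PySem.Chars.upper (PySem.List.slice (a :: b :: rest) (some i) (some (i + 2))))) =
    PySem.Chars.upper [a, b] ::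
      ((PySem.List.pyRange 0 ((rest.length : Nat) : Int) 2).map
        (fun i => PySem.Chars.upper (PySem.List.slice rest (some i) (some (i + 2))))) := by
  have hlc : ((a :: b :: rest).length) = rest.length + 2 := by simp
  rw [hlc, pvRange2, pvRange2, pvIdxs_cons, List.map_cons, List.map_map]
  refine congrArg₂ List.cons ?_ ?_
  · have h0 : PySem.List.slice (a :: b :: rest) (some 0) (some (0 + 2)) = [a, b] := by
      simp only [zero_add, PySem.List.slice_zero_start]
      rw [PySem.List.slice_to _ (by norm_num)]
      rfl
    rw [h0]
  · apply List.map_congr_left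
    intro i hi
    obtain ⟨k, -, rfl⟩ := List.mem_map.mp hi
    simp only [Function.comp]
    have c2 : (2 * ((k : Nat) : Int) + 2 + 2) = (((2 * k + 4 : Nat)) : Int) := by push_cast; ring
    have c1 : (2 * ((k : Nat) : Int) + 2) = (((2 * k + 2 : Nat)) : Int) := by push_cast; ring
    have c3 : (2 * ((k : Nat) : Int)) = (((2 * k : Nat)) : Int) := by push_cast; ring
    rw [c2, c1, c3, PySem.List.slice_natCast, PySem.List.slice_natCast]
    rw [show 2 * k + 4 - (2 * k + 2) = 2 from by omega, show 2 * k + 2 - 2 * k = 2 from by omega]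
    have hdr : List.drop (2 * k + 2) (a :: b :: rest) = List.drop (2 * k) rest := rfl
    rw [hdr]

lemma pvPairs_eq : ∀ (cs : List Char), cs.length % 2 = 0 →
    PySem.Chars.join [' ']
      ((PySem.List.pyRange 0 (cs.length : Int) 2).map
        (fun i => PySem.Chars.upper (PySem.List.slice cs (some i) (some (i + 2))))) =
    pvChunks cs
  | [], _ => by decide
  | [x], h => by simp at h
  | a :: b :: rest, h => by
      have hr : rest.length % 2 = 0 := by simp only [List.length_cons] at h; omega
      have ih := pvPairs_eq rest hr
      rw [pvPairsB_cons]
      rcases rest with _ | ⟨r1, rest'⟩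
      · rw [show PySem.List.pyRange 0 ((([] : List Char).length : Nat) : Int) 2 = [] from by decide]
        rw [List.map_nil, PySem.Chars.join_singleton]
        simp [pvChunks, PySem.Chars.upper]
      · -- rest nonempty (hence even, ≥ 2 chars): the tail pair list is nonempty
        have hne : ((PySem.List.pyRange 0 (((r1 :: rest').length : Nat) : Int) 2).map
            (fun i => PySem.Chars.upper (PySem.List.slice (r1 :: rest') (some i) (some (i + 2))))) ≠ [] := by
          rw [pvRange2]
          unfold pvIdxs
          simp only [ne_eq, List.map_eq_nil_iff, List.range_eq_nil, List.length_cons]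
          omega
        obtain ⟨q, qs, hqs⟩ := List.exists_cons_of_ne_nil hne
        rw [hqs, PySem.Chars.join_cons_cons, ← hqs, ih]
        simp [pvChunks, PySem.Chars.upper]

-- ===== VERDICT (by name: the statement is the Claim_ definition above) =====
theorem parse_hex_little_endian_negative_spec : Claim_equal_parse_hex_little_endian_negative := by
  intro s _
  unfold Spec_parse_hex_little_endian_negative
  unfold parse_hex_little_endian_negative parse_hex_little_endian_negative_alt
  have h1 : PySem.List.slice s.toList (some 3) (some ((s.toList.length : Int) + 1))
      = s.toList.drop 3 := by
    rw [PySem.List.slice_toNat _ (by norm_num) (by omega)]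
    have ha : ((3 : Int)).toNat = 3 := rfl
    have hb : ((s.toList.length : Int) + 1).toNat = s.toList.length + 1 := by omega
    rw [ha, hb]
    exact List.take_of_length_le (by simp; omega)
  have h2 : PySem.List.slice s.toList (some 3) none = s.toList.drop 3 := by
    rw [PySem.List.slice_from _ (by norm_num)]; rfl
  dsimp only
  rw [h1, h2, pvALoop_eq, List.append_nil]
  have hpad : (if (s.toList.drop 3).length % 2 = 1 then '0' :: s.toList.drop 3
      else s.toList.drop 3) = pvPad (s.toList.drop 3) := rfl
  rw [hpad, pvPairs_eq _ (pvPad_even _)]
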